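-- pv_equiv track=rewrite | github.com/maalina/Assignment_2 | synonyms.py | get_sentence_lists
-- ===== SOURCE A (Python) =====
-- def get_sentence_lists(text):
--     """
--     Break a string into sentences, which are broken into words.
--     :param text:    The string to be broken up
--     :return:    A list of lists of strings. The second level of lists
--     corresponds to the sentences.
--     """
--     if text == "":
--         return [[]]
--
--     import string
--
--     res = []
--     blank = []  # accumulates the list corresponding to the current sentence.
--     cur_word = ""
--
--     # Split text along every character
--     for ch in text + ".":  # ensure that our sentence always has a trailing
--         # period
--         if ch in ",-:;()\"\' \t\n" + string.whitespace:  # if we hit a word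
--         # break
--             if cur_word != "":
--                 blank.append(cur_word.lower())
--             cur_word = ""
--         elif ch in ".?!":
--             if cur_word != "":
--                 blank.append(cur_word.lower())
--             if blank != []:
--                 res.append(blank)
--             blank = []
--             cur_word = ""
--         else:
--             cur_word += ch
--
--     return res
-- ===== SOURCE B (Python) =====
-- import string
--
-- _SEPS = ",-:;()\"'" + string.whitespace
-- _SEP_TABLE = str.maketrans(dict.fromkeys(_SEPS, " "))
-- _END_TABLE = str.maketrans("?!", "..")
--
--
-- def get_sentence_lists(text):
--     if text == "":
--         return [[]]
--     res = []
--     for chunk in (text + ".").translate(_END_TABLE).split("."):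
--         words = [w.lower() for w in chunk.translate(_SEP_TABLE).split()]
--         if words:
--             res.append(words)
--     return res
-- ===== Notes on version B (the rewrite author's own statement) =====
-- stated objective: faster
-- what changed: A's hand-written character-by-character state machine with three accumulators is replaced by translate-and-split: map both alternative terminators to the period, split the text into sentence chunks on it, and per chunk map separators to spaces and whitespace-split into lowercased words.
import Mathlib
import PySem

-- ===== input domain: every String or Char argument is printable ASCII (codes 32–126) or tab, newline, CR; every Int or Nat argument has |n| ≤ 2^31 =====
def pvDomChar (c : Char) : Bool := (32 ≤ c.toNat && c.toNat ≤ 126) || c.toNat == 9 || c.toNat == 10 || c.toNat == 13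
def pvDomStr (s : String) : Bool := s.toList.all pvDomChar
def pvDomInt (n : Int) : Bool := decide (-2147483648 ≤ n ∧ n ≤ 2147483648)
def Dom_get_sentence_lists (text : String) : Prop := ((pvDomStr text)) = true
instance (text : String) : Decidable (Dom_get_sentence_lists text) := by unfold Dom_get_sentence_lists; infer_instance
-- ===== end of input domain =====

-- B replaces A's character-by-character state machine by translate-and-split (plainer decomposition; measured faster in CPython in a timing run).

-- ===== PORT A =====
-- the literal ",-:;()\"' \t\n" + string.whitespace (string.whitespace = " \t\n\r\v\f")
def pySepCharsA : List Char := [',', '-', ':', ';', '(', ')', '"', '\'', ' ', '\t', '\n'] ++ [' ', '\t', '\n', '\r', '\x0b', '\x0c']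

def pyEndChars : List Char := ['.', '?', '!']

-- one iteration of A's for-loop; state = (res, blank, cur_word) (cur_word kept as List Char)
def pyStepA (st : List (List String) × List String × List Char) (ch : Char) :
    List (List String) × List String × List Char :=
  let (res, blank, cur) := st
  if ch ∈ pySepCharsA then
    (res, if cur ≠ [] then blank ++ [String.ofList (PySem.Chars.lower cur)] else blank, [])
  else if ch ∈ pyEndChars then
    let blank' := if cur ≠ [] then blank ++ [String.ofList (PySem.Chars.lower cur)] else blank
    (if blank' ≠ [] then res ++ [blank'] else res, [], [])
  else
    (res, blank, cur ++ [ch])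

def get_sentence_lists (text : String) : List (List String) :=
  if text = "" then [[]]
  else ((text.toList ++ ['.']).foldl pyStepA ([], [], [])).1

-- ===== PORT B =====
-- B's _SEPS = ",-:;()\"'" + string.whitespace
def pySepCharsB : List Char := [',', '-', ':', ';', '(', ')', '"', '\''] ++ [' ', '\t', '\n', '\r', '\x0b', '\x0c']

-- str.maketrans("?!", "..") applied charwise
def endTransB (c : Char) : Char := if c = '?' ∨ c = '!' then '.' else c

-- _SEP_TABLE: every separator becomes a space
def sepTransB (c : Char) : Char := if c ∈ pySepCharsB then ' ' else c

-- words of one sentence chunk: translate separators to spaces, whitespace-split, lowercase each word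
def wordsB (chunk : List Char) : List String :=
  (PySem.Chars.split₀ (chunk.map sepTransB)).map (fun w => String.ofList (PySem.Chars.lower w))

def get_sentence_lists_alt (text : String) : List (List String) :=
  if text = "" then [[]]
  else
    (PySem.Chars.splitOn ((text.toList ++ ['.']).map endTransB) ['.']).foldl
      (fun res chunk => if wordsB chunk = [] then res else res ++ [wordsB chunk]) []

-- ===== PRECONDITION & SPEC =====
def Spec_get_sentence_lists (text : String) (out : List (List String)) : Prop := out = get_sentence_lists_alt text
instance (text : String) (out : List (List String)) : Decidable (Spec_get_sentence_lists text out) := by unfold Spec_get_sentence_lists; infer_instance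

-- ===== CLAIM (what is proved, stated in full; the proofs are below) =====
def Claim_equal_get_sentence_lists : Prop := ∀ (text : String), Dom_get_sentence_lists text → Spec_get_sentence_lists text (get_sentence_lists text)

-- ===== LEMMAS AND PROOFS =====

-- A's loop, as a recursion over the remaining characters (the res component only grows)
def procA : List Char → List String → List Char → List (List String)
  | [], _, _ => []
  | c :: t, blank, cur =>
    if c ∈ pySepCharsA then
      procA t (if cur ≠ [] then blank ++ [String.ofList (PySem.Chars.lower cur)] else blank) []
    else if c ∈ pyEndChars then
      let b := if cur ≠ [] then blank ++ [String.ofList (PySem.Chars.lower cur)] else blank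
      if b = [] then procA t [] [] else b :: procA t [] []
    else
      procA t blank (cur ++ [c])

-- split on '.' as a structural recursion (never returns [])
def sDot : List Char → List (List Char)
  | [] => [[]]
  | c :: t => if c = '.' then [] :: sDot t else (c :: (sDot t).headI) :: (sDot t).tail

-- whitespace split with a word accumulator (mirrors PySem.Chars.split₀.go)
def wSplit : List Char → List Char → List (List Char)
  | [], cur => if cur = [] then [] else [cur.reverse]
  | c :: t, cur => if PySem.Chars.isspace c then (if cur = [] then wSplit t [] else cur.reverse :: wSplit t []) else wSplit t (c :: cur)

-- B's per-chunk pipeline, applied to the chunk list with A's pending (blank, cur_word) merged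
-- into the first chunk; the last (unterminated) chunk is dropped.
def sentsPend : List (List Char) → List String → List Char → List (List String)
  | [], _, _ => []
  | [_], _, _ => []
  | p :: q :: r, blank, cur =>
    let w := blank ++ wordsB (cur ++ p)
    if w = [] then sentsPend (q :: r) [] [] else w :: sentsPend (q :: r) [] []

theorem headI_tail_of_ne {α : Type} [Inhabited α] (l : List α) (h : l ≠ []) : l.headI :: l.tail = l := by
  cases l with
  | nil => exact absurd rfl h
  | cons a t => rfl

theorem sDot_ne_nil (l : List Char) : sDot l ≠ [] := by
  cases l
  · simp [sDot]
  · simp [sDot]; split <;> simp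

theorem splitOn_go_dot (fuel : Nat) (l cur : List Char) (acc : List (List Char)) (h : l.length < fuel) :
    PySem.Chars.splitOn.go ['.'] fuel l cur acc = acc.reverse ++ ((cur.reverse ++ (sDot l).headI) :: (sDot l).tail) := by
  induction fuel generalizing l cur acc with
  | zero => omega
  | succ f ih =>
    cases l with
    | nil => simp [PySem.Chars.splitOn.go, sDot]
    | cons c t =>
      by_cases hc : c = '.'
      · subst hc
        rw [PySem.Chars.splitOn.go]
        simp only [List.isPrefixOf, List.length_cons] at *
        simp [ih t [] _ (by simpa using h), sDot, headI_tail_of_ne _ (sDot_ne_nil t)]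
      · rw [PySem.Chars.splitOn.go]
        have hpre : (['.'] : List Char).isPrefixOf (c :: t) = false := by
          cases t <;> simp [List.isPrefixOf, Ne.symm hc]
        simp only [hpre, Bool.false_eq_true, if_false]
        rw [ih t (c :: cur) acc (by simp at h ⊢; omega)]
        simp [sDot, hc]

theorem splitOn_dot (s : List Char) : PySem.Chars.splitOn s ['.'] = sDot s := by
  rw [PySem.Chars.splitOn, splitOn_go_dot _ _ _ _ (by omega)]
  simp [headI_tail_of_ne _ (sDot_ne_nil s)]

theorem split0_go_eq (l cur : List Char) (acc : List (List Char)) :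
    PySem.Chars.split₀.go l cur acc = acc.reverse ++ wSplit l cur := by
  induction l generalizing cur acc with
  | nil => rw [PySem.Chars.split₀.go]; cases cur <;> simp [wSplit]
  | cons c t ih =>
    rw [PySem.Chars.split₀.go]
    by_cases hs : PySem.Chars.isspace c
    · simp only [hs, if_true]
      cases cur <;> simp [wSplit, hs, ih]
    · simp [wSplit, hs, ih]

theorem split0_eq (s : List Char) : PySem.Chars.split₀ s = wSplit s [] := by
  rw [PySem.Chars.split₀, split0_go_eq]; simp

-- character-class facts
theorem sepA_iff_sepB (c : Char) : c ∈ pySepCharsA ↔ c ∈ pySepCharsB := by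
  simp [pySepCharsA, pySepCharsB]; tauto

theorem endTrans_of_sep (c : Char) (h : c ∈ pySepCharsA) : endTransB c = c ∧ c ≠ '.' := by
  fin_cases h <;> exact ⟨by decide, by decide⟩

theorem endTrans_of_end (c : Char) (h : c ∈ pyEndChars) : endTransB c = '.' := by
  fin_cases h <;> decide

theorem word_char_facts (c : Char) (hd : pvDomChar c = true) (hs : c ∉ pySepCharsA) (he : c ∉ pyEndChars) :
    sepTransB c = c ∧ endTransB c = c ∧ c ≠ '.' ∧ PySem.Chars.isspace c = false := by
  have hsB : c ∉ pySepCharsB := fun h => hs ((sepA_iff_sepB c).mpr h)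
  have hs' : c ≠ ',' ∧ c ≠ '-' ∧ c ≠ ':' ∧ c ≠ ';' ∧ c ≠ '(' ∧ c ≠ ')' ∧ c ≠ '"' ∧ c ≠ '\'' ∧
      c ≠ ' ' ∧ c ≠ '\t' ∧ c ≠ '\n' ∧ c ≠ '\r' ∧ c ≠ '\x0b' ∧ c ≠ '\x0c' := by
    simp [pySepCharsB] at hsB; tauto
  have he' : c ≠ '.' ∧ c ≠ '?' ∧ c ≠ '!' := by simp [pyEndChars] at he; tauto
  refine ⟨by simp [sepTransB, hsB], by simp [endTransB, he'.2.1, he'.2.2], he'.1, ?_⟩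
  have key : ∀ (x : Char) (n : Nat), c ≠ x → x.toNat = n → c.toNat ≠ n := by
    intro x n hne hx hn
    exact hne (by rw [← Char.ofNat_toNat c, hn, ← hx, Char.ofNat_toNat])
  have h32 := key ' ' 32 hs'.2.2.2.2.2.2.2.2.1 (by decide)
  have h9 := key '\t' 9 hs'.2.2.2.2.2.2.2.2.2.1 (by decide)
  have h10 := key '\n' 10 hs'.2.2.2.2.2.2.2.2.2.2.1 (by decide)
  have h13 := key '\r' 13 hs'.2.2.2.2.2.2.2.2.2.2.2.1 (by decide)
  have h11 := key '\x0b' 11 hs'.2.2.2.2.2.2.2.2.2.2.2.2.1 (by decide)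
  have h12 := key '\x0c' 12 hs'.2.2.2.2.2.2.2.2.2.2.2.2.2 (by decide)
  simp only [pvDomChar, Bool.or_eq_true, Bool.and_eq_true, decide_eq_true_eq, beq_iff_eq] at hd
  simp only [PySem.Chars.isspace]
  simp only [Bool.or_eq_false_iff, Bool.and_eq_false_iff, decide_eq_false_iff_not]
  omega

-- word-level lemmas about B's pipeline
theorem wordsB_nil : wordsB [] = [] := by simp [wordsB, split0_eq, wSplit]

theorem wSplit_word (cs : List Char) (rest cur : List Char) (h : ∀ c ∈ cs, PySem.Chars.isspace c = false) :
    wSplit (cs ++ rest) cur = wSplit rest (cs.reverse ++ cur) := by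
  induction cs generalizing cur with
  | nil => simp
  | cons c cs ih =>
    have hc := h c (by simp)
    simp only [List.cons_append, wSplit, hc, Bool.false_eq_true, if_false]
    rw [ih _ (fun x hx => h x (by simp [hx]))]
    simp

def isWordCur (cur : List Char) : Prop :=
  ∀ c ∈ cur, pvDomChar c = true ∧ c ∉ pySepCharsA ∧ c ∉ pyEndChars

theorem map_sepTransB_word (cur : List Char) (h : isWordCur cur) : cur.map sepTransB = cur := by
  rw [List.map_congr_left (fun c hc => (word_char_facts c (h c hc).1 (h c hc).2.1 (h c hc).2.2).1)]
  simp

theorem nonspace_of_word (cur : List Char) (h : isWordCur cur) :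
    ∀ c ∈ cur, PySem.Chars.isspace c = false :=
  fun c hc => (word_char_facts c (h c hc).1 (h c hc).2.1 (h c hc).2.2).2.2.2

theorem wordsB_word (cur : List Char) (h : isWordCur cur) :
    wordsB cur = if cur = [] then [] else [String.ofList (PySem.Chars.lower cur)] := by
  unfold wordsB
  rw [map_sepTransB_word cur h, split0_eq, ← List.append_nil cur, wSplit_word _ _ _ (nonspace_of_word cur h)]
  simp only [List.append_nil, wSplit]
  by_cases hc : cur = []
  · simp [hc]
  · simp [hc]

theorem wordsB_sep (cur : List Char) (hcur : isWordCur cur) (c : Char) (hc : c ∈ pySepCharsA) (h : List Char) :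
    wordsB (cur ++ c :: h) = wordsB cur ++ wordsB h := by
  have hcB : c ∈ pySepCharsB := (sepA_iff_sepB c).mp hc
  have e1 : (cur ++ c :: h).map sepTransB = cur ++ ' ' :: h.map sepTransB := by
    rw [List.map_append, map_sepTransB_word cur hcur]
    simp [sepTransB, hcB]
  rw [wordsB, e1, split0_eq, wSplit_word cur _ _ (nonspace_of_word cur hcur), wordsB_word cur hcur]
  simp only [List.append_nil, wSplit, show PySem.Chars.isspace ' ' = true by decide, if_true]
  rw [wordsB, split0_eq]
  by_cases hnil : cur = []
  · simp [hnil]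
  · simp [hnil, List.reverse_eq_nil_iff]

-- A's loop equals its recursion
theorem foldA_eq (l : List Char) (res : List (List String)) (blank : List String) (cur : List Char) :
    (l.foldl pyStepA (res, blank, cur)).1 = res ++ procA l blank cur := by
  induction l generalizing res blank cur with
  | nil => simp [procA]
  | cons c t ih =>
    simp only [List.foldl_cons, pyStepA, procA]
    by_cases h1 : c ∈ pySepCharsA
    · simp [h1, ih]
    · by_cases h2 : c ∈ pyEndChars
      · simp only [h1, if_pos h2, ite_not, if_false]
        by_cases hb : (if cur = [] then blank else blank ++ [String.ofList (PySem.Chars.lower cur)]) = []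
        · simp [hb, ih]
        · simp [hb, ih]
      · simp [h1, h2, ih]

-- the heart: A's recursion equals B's split pipeline with pending state merged in
theorem procA_eq (l : List Char) (blank : List String) (cur : List Char)
    (hl : ∀ c ∈ l, pvDomChar c = true) (hcur : isWordCur cur) :
    procA l blank cur = sentsPend (sDot (l.map endTransB)) blank cur := by
  induction l generalizing blank cur with
  | nil => simp [procA, sDot, sentsPend]
  | cons c t ih =>
    have hlt : ∀ x ∈ t, pvDomChar x = true := fun x hx => hl x (by simp [hx])
    obtain ⟨q, qs, hS⟩ := List.exists_cons_of_ne_nil (sDot_ne_nil (t.map endTransB))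
    by_cases h1 : c ∈ pySepCharsA
    · obtain ⟨het, hne⟩ := endTrans_of_sep c h1
      simp only [procA, h1, if_pos, List.map_cons, het]
      rw [ih _ [] hlt (by intro x hx; simp at hx)]
      simp only [sDot, hne, if_false, hS]
      cases qs with
      | nil => simp [sentsPend]
      | cons q2 r =>
        simp only [List.headI_cons, List.tail_cons, sentsPend]
        rw [wordsB_sep cur hcur c h1 q, wordsB_word cur hcur]
        by_cases hnil : cur = [] <;> simp [hnil]
    · by_cases h2 : c ∈ pyEndChars
      · have het := endTrans_of_end c h2
        simp only [procA, h1, if_false, if_pos h2, List.map_cons, het]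
        rw [ih _ [] hlt (by intro x hx; simp at hx)]
        simp only [sDot, if_pos, hS, sentsPend, List.append_nil]
        rw [wordsB_word cur hcur]
        by_cases hnil : cur = [] <;> simp [hnil]
      · have hw : pvDomChar c = true ∧ c ∉ pySepCharsA ∧ c ∉ pyEndChars :=
          ⟨hl c (by simp), h1, h2⟩
        obtain ⟨hsep, het, hdot, hsp⟩ := word_char_facts c hw.1 hw.2.1 hw.2.2
        have hcur' : isWordCur (cur ++ [c]) := by
          intro x hx
          rcases List.mem_append.mp hx with hx | hx
          · exact hcur x hx
          · simp at hx; subst hx; exact hw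
        simp only [procA, h1, h2, if_false, List.map_cons, het]
        rw [ih _ (cur ++ [c]) hlt hcur']
        simp only [sDot, hdot, if_false, hS]
        cases qs with
        | nil => simp [sentsPend]
        | cons q2 r =>
          simp only [List.headI_cons, List.tail_cons, sentsPend, List.append_assoc,
            List.singleton_append]

-- appending the final '.' appends one empty chunk
theorem sDot_append_dot (xs : List Char) : sDot (xs ++ ['.']) = sDot xs ++ [[]] := by
  induction xs with
  | nil => simp [sDot]
  | cons c t ih =>
    by_cases hc : c = '.'
    · simp [sDot, hc, ih]
    · obtain ⟨q, qs, hS⟩ := List.exists_cons_of_ne_nil (sDot_ne_nil t)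
      simp [sDot, hc, ih, hS]

-- B's filtering fold, against sentsPend, when the last chunk is empty
theorem foldB_eq (chunks : List (List Char)) (acc : List (List String))
    (h : chunks.getLast? = some []) :
    chunks.foldl (fun res chunk => if wordsB chunk = [] then res else res ++ [wordsB chunk]) acc =
      acc ++ sentsPend chunks [] [] := by
  induction chunks generalizing acc with
  | nil => simp at h
  | cons p rest ih =>
    cases rest with
    | nil =>
      simp only [List.getLast?_singleton, Option.some_inj] at h
      subst h
      simp [sentsPend, wordsB_nil]
    | cons q r =>
      rw [List.getLast?_cons_cons] at h
      rw [List.foldl_cons, ih _ h]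
      simp only [sentsPend, List.nil_append]
      by_cases hp : wordsB p = [] <;> simp [hp]

theorem get_sentence_lists_spec : Claim_equal_get_sentence_lists := by
  intro text hdom
  unfold Spec_get_sentence_lists get_sentence_lists get_sentence_lists_alt
  by_cases htext : text = ""
  · simp [htext]
  · simp only [htext, if_false]
    have hdomL : ∀ c ∈ text.toList ++ ['.'], pvDomChar c = true := by
      intro c hc
      rcases List.mem_append.mp hc with hc | hc
      · exact List.all_eq_true.mp hdom c hc
      · simp at hc; subst hc; decide
    rw [foldA_eq, splitOn_dot, procA_eq _ [] [] hdomL (by intro x hx; simp at hx)]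
    have e : (text.toList ++ ['.']).map endTransB = text.toList.map endTransB ++ ['.'] := by
      simp [endTransB]
    rw [e, sDot_append_dot, foldB_eq _ [] (by simp)]
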